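-- pv_equiv track=rewrite | github.com/edwardtavila-boop/eta-engine | scripts/_all_sentinels.py | _last_summary_line
-- ===== SOURCE A (Python) =====
-- VERDICT_KEYWORDS = ("GREEN", "YELLOW", "RED", "SKIP", "data-missing")
--
-- HINT_PREFIXES = ("- ", "* ", "Next:", "Fix:", "Suggested:", "Tip:", "  -", "  *")
--
-- def _last_summary_line(output: str) -> str:
--     """Find the final summary line.
--
--     Preference order:
--       1. last line containing a verdict keyword (GREEN/YELLOW/RED/SKIP)
--       2. last non-empty non-bullet, non-hint line
--       3. last non-empty line
--     """
--     lines = [ln.rstrip() for ln in output.splitlines() if ln.strip()]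
--     if not lines:
--         return "(no output)"
--     for line in reversed(lines):
--         if any(k in line for k in VERDICT_KEYWORDS):
--             return line.strip()
--     for line in reversed(lines):
--         s = line.strip()
--         if not s.startswith(HINT_PREFIXES):
--             return s
--     return lines[-1]
-- ===== SOURCE B (Python) =====
-- VERDICT_KEYWORDS = ("GREEN", "YELLOW", "RED", "SKIP", "data-missing")
--
-- HINT_PREFIXES = ("- ", "* ", "Next:", "Fix:", "Suggested:", "Tip:", "  -", "  *")
--
-- def _last_summary_line(output: str) -> str:
--     # One forward streaming pass: no line list, no reversal, no early return.
--     last_verdict = None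
--     last_plain = None
--     last_line = None
--     for raw in output.splitlines():
--         if not raw.strip():
--             continue
--         line = raw.rstrip()
--         last_line = line
--         if any(k in line for k in VERDICT_KEYWORDS):
--             last_verdict = line
--         s = line.strip()
--         if not s.startswith(HINT_PREFIXES):
--             last_plain = s
--     if last_line is None:
--         return "(no output)"
--     if last_verdict is not None:
--         return last_verdict.strip()
--     if last_plain is not None:
--         return last_plain
--     return last_line
-- ===== Notes on version B (the rewrite author's own statement) =====
-- stated objective: alternative
-- what changed: A builds a cleaned line list and makes two reversed scans with early returns; B streams the lines forward once, maintaining three last-seen accumulators (last verdict line, last non-hint line, last non-empty line) and picks among them after the loop.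
import Mathlib
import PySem

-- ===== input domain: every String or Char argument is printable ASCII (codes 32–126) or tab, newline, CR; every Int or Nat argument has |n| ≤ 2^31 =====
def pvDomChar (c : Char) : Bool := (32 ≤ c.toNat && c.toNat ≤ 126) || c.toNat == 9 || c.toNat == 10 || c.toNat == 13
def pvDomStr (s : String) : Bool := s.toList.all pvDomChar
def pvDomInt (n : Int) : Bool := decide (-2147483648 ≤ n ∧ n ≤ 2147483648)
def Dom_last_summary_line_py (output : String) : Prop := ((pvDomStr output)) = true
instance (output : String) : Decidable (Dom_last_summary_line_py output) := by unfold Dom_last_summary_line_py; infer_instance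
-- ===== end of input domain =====

-- B replaces A's cleaned list + two reversed early-return scans by a single forward
-- streaming pass keeping three last-seen accumulators (alternative decomposition, same cost).

-- shared module-level constants and per-line predicates (same for both programs)
def pvVerdicts : List String := ["GREEN", "YELLOW", "RED", "SKIP", "data-missing"]
def pvHints : List String := ["- ", "* ", "Next:", "Fix:", "Suggested:", "Tip:", "  -", "  *"]
-- any(k in line for k in VERDICT_KEYWORDS)
def pvHasVerdict (line : String) : Bool := pvVerdicts.any (fun k => PySem.Str.isIn k line)
-- s.startswith(HINT_PREFIXES)  (a tuple argument means: any prefix matches)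
def pvIsHint (s : String) : Bool := pvHints.any (fun p => PySem.Str.startswith s p)

-- ===== PORT A =====
-- lines = [ln.rstrip() for ln in output.splitlines() if ln.strip()]
def pvLinesA (output : String) : List String :=
  ((PySem.Str.splitlines output).filter (fun ln => !(PySem.Str.strip ln == ""))).map PySem.Str.rstrip
-- first loop: for line in reversed(lines): if any verdict keyword: return line.strip()
def pvLoopA1 : List String → Option String
  | [] => none
  | l :: rest => if pvHasVerdict l then some (PySem.Str.strip l) else pvLoopA1 rest
-- second loop: for line in reversed(lines): s = line.strip(); if not s.startswith(HINT_PREFIXES): return s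
def pvLoopA2 : List String → Option String
  | [] => none
  | l :: rest =>
      if !pvIsHint (PySem.Str.strip l) then some (PySem.Str.strip l) else pvLoopA2 rest

def last_summary_line_py (output : String) : String :=
  let lines := pvLinesA output
  if lines.isEmpty then "(no output)"
  else
    match pvLoopA1 lines.reverse with
    | some r => r
    | none =>
      match pvLoopA2 lines.reverse with
      | some r => r
      | none => (PySem.List.pyGet? lines (-1)).getD ""   -- lines[-1]; lines is nonempty here, so getD never fires

-- ===== PORT B =====
-- loop body of B's single forward pass: skip blank lines, update the three last-seen slots
def pvStepB (st : Option String × Option String × Option String) (raw : String) :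
    Option String × Option String × Option String :=
  if PySem.Str.strip raw == "" then st
  else
    let line := PySem.Str.rstrip raw
    let v := if pvHasVerdict line then some line else st.1
    let s := PySem.Str.strip line
    let p := if !pvIsHint s then some s else st.2.1
    (v, p, some line)

def last_summary_line_py_alt (output : String) : String :=
  let st := (PySem.Str.splitlines output).foldl pvStepB (none, none, none)
  match st.2.2 with
  | none => "(no output)"
  | some last =>
    match st.1 with
    | some lv => PySem.Str.strip lv
    | none =>
      match st.2.1 with
      | some s => s
      | none => last

-- ===== PRECONDITION & SPEC =====
def Spec_last_summary_line_py (output : String) (out : String) : Prop := out = last_summary_line_py_alt output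
instance (output : String) (out : String) : Decidable (Spec_last_summary_line_py output out) := by unfold Spec_last_summary_line_py; infer_instance

-- ===== CLAIM (what is proved, stated in full; the proofs are below) =====
def Claim_equal_last_summary_line_py : Prop := ∀ (output : String), Dom_last_summary_line_py output → Spec_last_summary_line_py output (last_summary_line_py output)

-- ===== LEMMAS AND PROOFS =====

-- proof helpers: "first verdict line (raw)" and "first non-hint stripped line" in scan order
def pvFvr : List String → Option String
  | [] => none
  | l :: rest => if pvHasVerdict l then some l else pvFvr rest

theorem pvLoopA1_eq_fvr (rl : List String) : pvLoopA1 rl = (pvFvr rl).map PySem.Str.strip := by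
  induction rl with
  | nil => simp [pvLoopA1, pvFvr]
  | cons l rest ih => by_cases h : pvHasVerdict l = true <;> simp [pvLoopA1, pvFvr, h, ih]

theorem pvFvr_append (xs ys : List String) :
    pvFvr (xs ++ ys) = (pvFvr xs).or (pvFvr ys) := by
  induction xs with
  | nil => simp [pvFvr]
  | cons l rest ih => by_cases h : pvHasVerdict l = true <;> simp [pvFvr, h, ih]

theorem pvLoopA2_append (xs ys : List String) :
    pvLoopA2 (xs ++ ys) = (pvLoopA2 xs).or (pvLoopA2 ys) := by
  induction xs with
  | nil => simp [pvLoopA2]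
  | cons l rest ih => by_cases h : pvIsHint (PySem.Str.strip l) = true <;> simp [pvLoopA2, h, ih]

-- the no-blank-filter body of pvStepB (blanks already removed, rstrip already applied)
def pvStepB' (st : Option String × Option String × Option String) (line : String) :
    Option String × Option String × Option String :=
  ((if pvHasVerdict line then some line else st.1),
   (if !pvIsHint (PySem.Str.strip line) then some (PySem.Str.strip line) else st.2.1),
   some line)

theorem pvFoldB_filter (ls : List String) : ∀ st,
    ls.foldl pvStepB st = (((ls.filter (fun ln => !(PySem.Str.strip ln == ""))).map PySem.Str.rstrip).foldl pvStepB' st) := by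
  induction ls with
  | nil => intro st; simp
  | cons l rest ih =>
    intro st
    by_cases h : PySem.Str.strip l == ""
    · simp [List.foldl, pvStepB, h, ih]
    · have hc : (!(PySem.Str.strip l == "")) = true := by simp [h]
      simp only [List.foldl, List.filter_cons, hc, if_pos, List.map_cons]
      rw [ih]
      congr 1
      simp [pvStepB, pvStepB', h]

-- characterisation of B's fold by the three reversed-scan results
theorem pvFoldB'_eq (ls : List String) : ∀ st,
    ls.foldl pvStepB' st =
      ((pvFvr ls.reverse).or st.1, (pvLoopA2 ls.reverse).or st.2.1, ls.reverse.head?.or st.2.2) := by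
  induction ls with
  | nil => intro st; simp [pvFvr, pvLoopA2]
  | cons l rest ih =>
    intro st
    simp only [List.foldl, ih, List.reverse_cons, pvFvr_append, pvLoopA2_append,
      List.head?_append, Option.or_assoc]
    by_cases h : pvHasVerdict l = true <;>
      by_cases h2 : pvIsHint (PySem.Str.strip l) = true <;>
        simp [pvStepB', pvFvr, pvLoopA2, h, h2, Option.or]

-- ===== VERDICT (by name: the statement is the Claim_ definition above) =====
theorem last_summary_line_py_spec : Claim_equal_last_summary_line_py := by
  intro output _
  unfold Spec_last_summary_line_py last_summary_line_py last_summary_line_py_alt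
  have hfold : (PySem.Str.splitlines output).foldl pvStepB (none, none, none)
      = ((pvFvr (pvLinesA output).reverse), (pvLoopA2 (pvLinesA output).reverse),
         (pvLinesA output).reverse.head?) := by
    rw [pvFoldB_filter]
    show (pvLinesA output).foldl pvStepB' (none, none, none) = _
    rw [pvFoldB'_eq]
    simp
  simp only [hfold, pvLoopA1_eq_fvr]
  cases hrev : (pvLinesA output).reverse with
  | nil =>
    have h0 : pvLinesA output = [] := by
      have := congrArg List.reverse hrev; simpa using this
    simp [h0]
  | cons a tl =>
    have hne : pvLinesA output ≠ [] := by
      intro h; rw [h] at hrev; simp at hrev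
    have hempty : (pvLinesA output).isEmpty = false := by
      simp [hne]
    have hlast : PySem.List.pyGet? (pvLinesA output) (-1) = some a := by
      rw [PySem.List.pyGet?_neg_one, ← List.head?_reverse, hrev]; rfl
    simp only [hempty, Bool.false_eq_true, if_false, hlast, List.head?_cons]
    cases pvFvr (a :: tl) <;> cases pvLoopA2 (a :: tl) <;> simp
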